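-- pv_equiv track=rewrite | github.com/Heisenberg99-pr/Python | Esercizzi/esercizio18.py | ordina_parole
-- ===== SOURCE A (Python) =====
-- def ordina_parole(frequenza):
--     parole = list(frequenza.keys()) # Recupero delle chiavi del dizionario
--     n = len(parole)
--
--     for i in range(n):
--         for j in range(i+1, n):
--             if(frequenza[parole[i]] < frequenza[parole[j]]) or (frequenza[parole[i]] == frequenza[parole[j]] and parole[i] > parole[j]):
--                 parole[i],parole[j] = parole[j], parole[i]
--     parole_ordinate = []
--     for parola in parole:
--         parole_ordinate.append((parola,frequenza[parola]))
--     return parole_ordinate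
-- ===== SOURCE B (Python) =====
-- def ordina_parole(frequenza):
--     # One library sort with a composite key: frequency descending, word ascending.
--     return sorted(frequenza.items(), key=lambda kv: (-kv[1], kv[0]))
-- ===== Notes on version B (the rewrite author's own statement) =====
-- stated objective: faster
-- what changed: Replaces the hand-written quadratic exchange (selection-style) sort with repeated dict lookups by a single library sort of the items with the composite key (-frequency, word).
import Mathlib
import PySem

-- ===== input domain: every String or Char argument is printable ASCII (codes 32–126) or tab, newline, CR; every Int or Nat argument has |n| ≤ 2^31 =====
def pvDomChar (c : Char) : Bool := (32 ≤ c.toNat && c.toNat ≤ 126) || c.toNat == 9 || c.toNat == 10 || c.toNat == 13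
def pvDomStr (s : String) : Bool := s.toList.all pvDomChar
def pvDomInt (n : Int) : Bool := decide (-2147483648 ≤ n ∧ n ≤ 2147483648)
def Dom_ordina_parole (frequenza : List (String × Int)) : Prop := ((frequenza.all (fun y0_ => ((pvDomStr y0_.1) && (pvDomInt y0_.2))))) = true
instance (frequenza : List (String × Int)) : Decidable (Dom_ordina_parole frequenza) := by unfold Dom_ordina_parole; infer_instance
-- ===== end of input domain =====

-- B replaces A's hand-written quadratic exchange sort by one library sort keyed by (-frequency, word); return values proved equal.

-- ===== PORT A =====
-- parole[i], parole[j] = parole[j], parole[i]  (both indices produced by range(), hence in bounds and ≥ 0: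
-- getD/toNat are exact here, and every looked-up word is a key of the dict, so getD _ 0 is the plain d[w])
def pvSwap (p : List String) (i j : Nat) : List String :=
  let a := p.getD i ""
  let b := p.getD j ""
  (p.set i b).set j a

def ordina_parole (frequenza : List (String × Int)) : List (String × Int) :=
  let d := PySem.Dict.ofList frequenza          -- the dict argument, under the association-list convention
  let parole0 := d.keys                          -- parole = list(frequenza.keys())
  let n : Int := (parole0.length : Int)          -- n = len(parole)
  let parole := (PySem.List.pyRange 0 n).foldl (fun p i =>
    (PySem.List.pyRange (i + 1) n).foldl (fun p j =>
      if d.getD (p.getD i.toNat "") 0 < d.getD (p.getD j.toNat "") 0 ∨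
         (d.getD (p.getD i.toNat "") 0 = d.getD (p.getD j.toNat "") 0 ∧
          p.getD j.toNat "" < p.getD i.toNat "") then
        pvSwap p i.toNat j.toNat
      else p) p) parole0
  parole.foldl (fun acc w => acc ++ [(w, d.getD w 0)]) []   -- parole_ordinate.append((parola, frequenza[parola]))

-- ===== PORT B =====
-- sorted(frequenza.items(), key=lambda kv: (-kv[1], kv[0])); the tuple key is the lexicographic product order
def ordina_parole_alt (frequenza : List (String × Int)) : List (String × Int) :=
  PySem.List.sorted (PySem.Dict.ofList frequenza).items
    (fun kv => toLex (-kv.2, kv.1)) false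

-- ===== PRECONDITION & SPEC =====
def Spec_ordina_parole (frequenza : List (String × Int)) (out : List (String × Int)) : Prop := out = ordina_parole_alt frequenza
instance (frequenza : List (String × Int)) (out : List (String × Int)) : Decidable (Spec_ordina_parole frequenza out) := by unfold Spec_ordina_parole; infer_instance

-- ===== CLAIM (what is proved, stated in full; the proofs are below) =====
def Claim_equal_ordina_parole : Prop := ∀ (frequenza : List (String × Int)), Dom_ordina_parole frequenza → Spec_ordina_parole frequenza (ordina_parole frequenza)

-- ===== LEMMAS AND PROOFS =====

-- the composite sort key, on words (via the dict) and on items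
def pvKey (d : PySem.Dict String Int) (w : String) : Lex (Int × String) := toLex (-(d.getD w 0), w)

-- one inner pass of A, as a fold over the segment to the right of position i:
-- state = (current value at position i, values already passed over, in order)
def pvStep (d : PySem.Dict String Int) (s : String × List String) (y : String) : String × List String :=
  if d.getD s.1 0 < d.getD y 0 ∨ (d.getD s.1 0 = d.getD y 0 ∧ y < s.1) then
    (y, s.2 ++ [s.1])
  else
    (s.1, s.2 ++ [y])

lemma pvStep_foldl_snd_length (d : PySem.Dict String Int) (ys : List String) (c : String) (acc : List String) :
    ((ys.foldl (pvStep d) (c, acc)).2).length = acc.length + ys.length := by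
  induction ys generalizing c acc with
  | nil => simp
  | cons y ys ih =>
      simp only [List.foldl_cons, pvStep]
      split <;> (rw [ih]; simp; try omega)

-- A's outer loop, in segment form: repeatedly select the head of the remaining segment
def pvPass (d : PySem.Dict String Int) (x : String) (ys : List String) : String × List String :=
  ys.foldl (pvStep d) (x, [])

def pvSel (d : PySem.Dict String Int) (done rest : List String) : List String :=
  match rest with
  | [] => done
  | x :: ys => pvSel d (done ++ [(pvPass d x ys).1]) (pvPass d x ys).2
termination_by rest.length
decreasing_by
  have := pvStep_foldl_snd_length d ys x []
  simp_all [pvPass]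

lemma pvStep_cond_iff (d : PySem.Dict String Int) (c y : String) :
    (d.getD c 0 < d.getD y 0 ∨ (d.getD c 0 = d.getD y 0 ∧ y < c)) ↔ pvKey d y < pvKey d c := by
  simp only [pvKey, Prod.Lex.toLex_lt_toLex]
  constructor
  · rintro (h | ⟨h1, h2⟩)
    · exact Or.inl (by omega)
    · exact Or.inr ⟨by omega, h2⟩
  · rintro (h | ⟨h1, h2⟩)
    · exact Or.inl (by omega)
    · exact Or.inr ⟨by omega, h2⟩

lemma pvKey_injective (d : PySem.Dict String Int) : Function.Injective (pvKey d) := by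
  intro a b h
  have h' : d.getD a 0 = d.getD b 0 ∧ a = b := by simpa [pvKey, Prod.ext_iff] using h
  exact h'.2

lemma pvStep_foldl_perm (d : PySem.Dict String Int) (ys : List String) (c : String) (acc : List String) :
    ((ys.foldl (pvStep d) (c, acc)).1 :: (ys.foldl (pvStep d) (c, acc)).2).Perm (c :: acc ++ ys) := by
  induction ys generalizing c acc with
  | nil => simp
  | cons y ys ih =>
      simp only [List.foldl_cons, pvStep]
      split
      · refine (ih y (acc ++ [c])).trans ?_
        rw [List.perm_iff_count]
        intro a
        simp [List.count_append, List.count_cons]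
        try omega
      · refine (ih c (acc ++ [y])).trans ?_
        rw [List.perm_iff_count]
        intro a
        simp [List.count_append, List.count_cons]
        try omega

lemma pvStep_foldl_min (d : PySem.Dict String Int) (ys : List String) (c : String) (acc : List String)
    (hacc : ∀ z ∈ acc, pvKey d c ≤ pvKey d z) :
    ∀ z ∈ (ys.foldl (pvStep d) (c, acc)).2, pvKey d (ys.foldl (pvStep d) (c, acc)).1 ≤ pvKey d z := by
  induction ys generalizing c acc with
  | nil => simpa using hacc
  | cons y ys ih =>
      simp only [List.foldl_cons, pvStep]
      split
      · rename_i hc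
        refine ih y (acc ++ [c]) ?_
        have hyc : pvKey d y < pvKey d c := (pvStep_cond_iff d c y).mp hc
        intro z hz
        rcases List.mem_append.mp hz with hz | hz
        · exact le_of_lt (lt_of_lt_of_le hyc (hacc z hz))
        · simp at hz; subst hz; exact le_of_lt hyc
      · rename_i hc
        refine ih c (acc ++ [y]) ?_
        have hcy : pvKey d c ≤ pvKey d y := le_of_not_gt (fun h => hc ((pvStep_cond_iff d c y).mpr h))
        intro z hz
        rcases List.mem_append.mp hz with hz | hz
        · exact hacc z hz
        · simp at hz; subst hz; exact hcy

lemma pvSel_perm (d : PySem.Dict String Int) (done rest : List String) :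
    (pvSel d done rest).Perm (done ++ rest) := by
  fun_induction pvSel d done rest with
  | case1 done => simp
  | case2 done x ys ih =>
      refine ih.trans ?_
      have h1 : (((pvPass d x ys).1 :: (pvPass d x ys).2)).Perm (x :: ys) := by
        simpa [pvPass] using pvStep_foldl_perm d ys x []
      have h2 := List.Perm.append_left done h1
      simpa using h2

lemma pvSel_pairwise (d : PySem.Dict String Int) (done rest : List String)
    (hnd : (done ++ rest).Nodup)
    (hdp : done.Pairwise (fun a b => pvKey d a < pvKey d b))
    (hsep : ∀ a ∈ done, ∀ b ∈ rest, pvKey d a < pvKey d b) :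
    (pvSel d done rest).Pairwise (fun a b => pvKey d a < pvKey d b) := by
  fun_induction pvSel d done rest with
  | case1 done => exact hdp
  | case2 done x ys ih =>
      set r := pvPass d x ys with hrdef
      have hperm : (r.1 :: r.2).Perm (x :: ys) := by
        simpa [hrdef, pvPass] using pvStep_foldl_perm d ys x []
      have hmin : ∀ z ∈ r.2, pvKey d r.1 ≤ pvKey d z := by
        simpa [hrdef, pvPass] using pvStep_foldl_min d ys x [] (by simp)
      have hperm' : (done ++ [r.1] ++ r.2).Perm (done ++ x :: ys) := by
        have h2 := List.Perm.append_left done hperm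
        simpa using h2
      have hnd' : (done ++ [r.1] ++ r.2).Nodup := (hperm'.nodup_iff).mpr hnd
      have hr1mem : r.1 ∈ x :: ys := hperm.mem_iff.mp (by simp)
      have hr2sub : ∀ z ∈ r.2, z ∈ x :: ys := fun z hz => hperm.mem_iff.mp (by simp [hz])
      have hminlt : ∀ z ∈ r.2, pvKey d r.1 < pvKey d z := by
        intro z hz
        refine lt_of_le_of_ne (hmin z hz) (fun he => ?_)
        have : r.1 = z := pvKey_injective d he
        subst this
        have hxys : (x :: ys).Nodup := hnd.of_append_right
        have : (r.1 :: r.2).Nodup := hperm.nodup_iff.mpr hxys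
        exact (List.nodup_cons.mp this).1 hz
      refine ih ?_ ?_ ?_
      · simpa [List.append_assoc] using hnd'
      · refine List.pairwise_append.mpr ⟨hdp, by simp, ?_⟩
        intro a ha b hb
        simp at hb; subst hb
        exact hsep a ha r.1 hr1mem
      · intro a ha b hb
        rcases List.mem_append.mp ha with ha | ha
        · exact hsep a ha b (hr2sub b hb)
        · simp at ha; subst ha; exact hminlt b hb

-- the list positions the index loops manipulate
lemma pvGetD_mid (pre : List String) (c : String) (t : List String) (k : Nat) (hk : k = pre.length) :
    (pre ++ c :: t).getD k "" = c := by
  subst hk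
  induction pre with
  | nil => simp
  | cons p pre ih => simp only [List.cons_append, List.length_cons, List.getD_cons_succ]; exact ih

lemma pvSet_mid (pre : List String) (c v : String) (t : List String) (k : Nat) (hk : k = pre.length) :
    (pre ++ c :: t).set k v = pre ++ v :: t := by
  subst hk
  induction pre with
  | nil => simp
  | cons p pre ih => simp only [List.cons_append, List.length_cons, List.set_cons_succ]; exact congrArg (p :: ·) ih

-- the inner index loop is the segment fold over the part of the list right of position i
lemma pvInner_eq (d : PySem.Dict String Int) (pre : List String) (c : String) (acc rest : List String)
    (i J N : Int) (hi : i = (pre.length : Int))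
    (hJ : J = (pre.length : Int) + 1 + (acc.length : Int))
    (hN : N = (pre.length : Int) + 1 + (acc.length : Int) + (rest.length : Int)) :
    (PySem.List.pyRange J N).foldl
      (fun p j =>
        if d.getD (p.getD i.toNat "") 0 < d.getD (p.getD j.toNat "") 0 ∨
           (d.getD (p.getD i.toNat "") 0 = d.getD (p.getD j.toNat "") 0 ∧
            p.getD j.toNat "" < p.getD i.toNat "") then
          pvSwap p i.toNat j.toNat
        else p)
      (pre ++ c :: (acc ++ rest))
    = pre ++ (rest.foldl (pvStep d) (c, acc)).1 :: (rest.foldl (pvStep d) (c, acc)).2 := by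
  induction rest generalizing c acc J with
  | nil =>
      simp only [List.length_nil, Nat.cast_zero, add_zero] at hN
      rw [PySem.List.pyRange_one_eq_nil (by omega)]
      simp
  | cons y rest ih =>
      simp only [List.length_cons] at hN
      push_cast at hN
      rw [PySem.List.pyRange_one_cons (by omega)]
      simp only [List.foldl_cons]
      have hiN : i.toNat = pre.length := by omega
      have hJN : J.toNat = (pre ++ c :: acc).length := by simp; omega
      have hgi : (pre ++ c :: (acc ++ y :: rest)).getD i.toNat "" = c :=
        pvGetD_mid pre c (acc ++ y :: rest) i.toNat hiN
      have hgj : (pre ++ c :: (acc ++ y :: rest)).getD J.toNat "" = y := by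
        have : pre ++ c :: (acc ++ y :: rest) = (pre ++ c :: acc) ++ y :: rest := by
          simp
        rw [this]
        exact pvGetD_mid (pre ++ c :: acc) y rest J.toNat hJN
      rw [hgi, hgj]
      by_cases hc : d.getD c 0 < d.getD y 0 ∨ (d.getD c 0 = d.getD y 0 ∧ y < c)
      · rw [if_pos hc]
        have hswap : pvSwap (pre ++ c :: (acc ++ y :: rest)) i.toNat J.toNat
            = pre ++ y :: ((acc ++ [c]) ++ rest) := by
          unfold pvSwap
          rw [hgi, hgj]
          show ((pre ++ c :: (acc ++ y :: rest)).set i.toNat y).set J.toNat c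
              = pre ++ y :: (acc ++ [c] ++ rest)
          rw [pvSet_mid pre c y (acc ++ y :: rest) i.toNat hiN]
          have h2 : pre ++ y :: (acc ++ y :: rest) = (pre ++ y :: acc) ++ y :: rest := by simp
          rw [h2, pvSet_mid (pre ++ y :: acc) y c rest J.toNat (by simp; omega)]
          simp
        rw [hswap, ih y (acc ++ [c]) (J + 1) (by simp; omega) (by simp; omega)]
        simp only [pvStep, if_pos hc]
      · rw [if_neg hc]
        have h3 : pre ++ c :: (acc ++ y :: rest) = pre ++ c :: ((acc ++ [y]) ++ rest) := by simp
        rw [h3, ih c (acc ++ [y]) (J + 1) (by simp; omega) (by simp; omega)]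
        simp only [pvStep, if_neg hc]

-- the outer index loop is pvSel
lemma pvOuter_eq (d : PySem.Dict String Int) (done rest : List String) :
    ∀ (s N : Int), s = (done.length : Int) → N = (done.length : Int) + (rest.length : Int) →
    (PySem.List.pyRange s N).foldl
      (fun p i =>
        (PySem.List.pyRange (i + 1) N).foldl
          (fun p j =>
            if d.getD (p.getD i.toNat "") 0 < d.getD (p.getD j.toNat "") 0 ∨
               (d.getD (p.getD i.toNat "") 0 = d.getD (p.getD j.toNat "") 0 ∧
                p.getD j.toNat "" < p.getD i.toNat "") then
              pvSwap p i.toNat j.toNat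
            else p) p)
      (done ++ rest)
    = pvSel d done rest := by
  fun_induction pvSel d done rest with
  | case1 done =>
      intro s N hs hN
      simp only [List.length_nil, Nat.cast_zero, add_zero] at hN
      rw [PySem.List.pyRange_one_eq_nil (by omega)]
      simp
  | case2 done x ys ih =>
      intro s N hs hN
      simp only [List.length_cons] at hN
      push_cast at hN
      rw [PySem.List.pyRange_one_cons (by omega)]
      simp only [List.foldl_cons]
      have h0 : done ++ x :: ys = done ++ x :: (([] : List String) ++ ys) := by simp
      rw [h0, pvInner_eq d done x [] ys s (s + 1) N hs (by simp; omega) (by simp; omega)]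
      have hlen : (pvPass d x ys).2.length = ys.length := by
        simpa [pvPass] using pvStep_foldl_snd_length d ys x []
      have h1 : done ++ (pvPass d x ys).1 :: (pvPass d x ys).2
          = (done ++ [(pvPass d x ys).1]) ++ (pvPass d x ys).2 := by simp
      have h2 : (ys.foldl (pvStep d) (x, [])).1 = (pvPass d x ys).1 := rfl
      have h3 : (ys.foldl (pvStep d) (x, [])).2 = (pvPass d x ys).2 := rfl
      rw [h2, h3, h1, ih (s + 1) N (by simp; omega) (by simp [hlen]; omega)]

-- ===== VERDICT (by name: the statement is the Claim_ definition above) =====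
theorem ordina_parole_spec : Claim_equal_ordina_parole := by
  intro frequenza _
  unfold Spec_ordina_parole ordina_parole ordina_parole_alt
  show List.foldl (fun acc w => acc ++ [(w, (PySem.Dict.ofList frequenza).getD w 0)]) []
      (List.foldl
        (fun p i =>
          List.foldl
            (fun p j =>
              if (PySem.Dict.ofList frequenza).getD (p.getD i.toNat "") 0 <
                   (PySem.Dict.ofList frequenza).getD (p.getD j.toNat "") 0 ∨
                 ((PySem.Dict.ofList frequenza).getD (p.getD i.toNat "") 0 =
                    (PySem.Dict.ofList frequenza).getD (p.getD j.toNat "") 0 ∧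
                  p.getD j.toNat "" < p.getD i.toNat "") then
                pvSwap p i.toNat j.toNat
              else p)
            p (PySem.List.pyRange (i + 1) ((PySem.Dict.ofList frequenza).keys.length : Int)))
        (PySem.Dict.ofList frequenza).keys
        (PySem.List.pyRange 0 ((PySem.Dict.ofList frequenza).keys.length : Int)))
    = PySem.List.sorted (PySem.Dict.ofList frequenza).items (fun kv => toLex (-kv.2, kv.1)) false
  set d := PySem.Dict.ofList frequenza with hd
  set ks := d.keys with hks
  have hnd : ks.Nodup := PySem.Dict.nodup_keys_ofList frequenza
  have houter := pvOuter_eq d [] ks 0 (ks.length : Int) (by simp) (by simp)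
  simp only [List.nil_append] at houter
  rw [houter, PySem.List.foldl_append_singleton_eq_map]
  have hitems : d.items = ks.map (fun k => (k, d.getD k 0)) :=
    PySem.Dict.items_eq_map_keys d hnd 0
  symm
  refine PySem.List.sorted_eq_of_perm_of_pairwise_lt d.items _ _ ?_ ?_
  · rw [hitems]
    exact (((pvSel_perm d [] ks).map _).trans (by simp))
  · simp only [List.nil_append, List.pairwise_map]
    have := pvSel_pairwise d [] ks (by simpa using hnd) (by simp) (by simp)
    refine this.imp ?_
    intro a b hab
    simpa [pvKey] using hab
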